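-- pv_equiv track=rewrite | github.com/moiraxavier/advent-of-code | day-2/day-2.py | contains_2_3
-- ===== SOURCE A (Python) =====
-- def contains_2_3(ID):
--     letter_count = {}
--     for letter in ID:
--         if letter in letter_count:
--             letter_count[letter] += 1
--         else:
--             letter_count[letter] = 1
--     two_letters = 2 in letter_count.values()
--     three_letters = 3 in letter_count.values()
--
--     return (two_letters, three_letters)
-- ===== SOURCE B (Python) =====
-- def contains_2_3(ID):
--     distinct = set(ID)
--     two = any(sum(1 for ch in ID if ch == c) == 2 for c in distinct)
--     three = any(sum(1 for ch in ID if ch == c) == 3 for c in distinct)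
--     return (two, three)
-- ===== Notes on version B (the rewrite author's own statement) =====
-- stated objective: idiomatic
-- what changed: B drops A's incrementally built frequency dict entirely: it takes the distinct letters as a set and asks with any() whether some letter occurs exactly 2 (resp. 3) times, counting occurrences by a direct scan per distinct letter.
import Mathlib
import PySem

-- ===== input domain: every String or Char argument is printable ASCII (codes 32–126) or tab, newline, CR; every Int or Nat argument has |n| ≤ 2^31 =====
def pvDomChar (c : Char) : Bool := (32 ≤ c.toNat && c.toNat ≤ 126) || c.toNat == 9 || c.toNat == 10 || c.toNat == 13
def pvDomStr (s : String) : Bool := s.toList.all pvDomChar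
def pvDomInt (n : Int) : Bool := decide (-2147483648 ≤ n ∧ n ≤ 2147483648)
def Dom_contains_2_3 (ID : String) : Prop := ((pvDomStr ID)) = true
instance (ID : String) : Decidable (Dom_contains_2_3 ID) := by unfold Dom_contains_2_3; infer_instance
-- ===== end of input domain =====

-- B replaces A's frequency dict with a set of distinct letters and per-letter any()/count scans (idiomatic, same result).

-- ===== PORT A =====
def contains_2_3 (ID : String) : Bool × Bool :=
  let letter_count : PySem.Dict Char Int :=
    ID.toList.foldl
      (fun d letter =>
        if d.contains letter then d.insert letter (d.getD letter 0 + 1)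
        else d.insert letter 1)
      PySem.Dict.empty
  let two_letters := decide ((2 : Int) ∈ letter_count.values)
  let three_letters := decide ((3 : Int) ∈ letter_count.values)
  (two_letters, three_letters)

-- ===== PORT B =====
def contains_2_3_alt (ID : String) : Bool × Bool :=
  let distinct : PySem.Set Char := PySem.Set.ofList ID.toList
  let cnt : Char → Int := fun c => ((ID.toList.filter (fun ch => ch == c)).map (fun _ => (1 : Int))).sum
  let two := distinct.any (fun c => cnt c == 2)
  let three := distinct.any (fun c => cnt c == 3)
  (two, three)

-- ===== PRECONDITION & SPEC =====
def Spec_contains_2_3 (ID : String) (out : Bool × Bool) : Prop := out = contains_2_3_alt ID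
instance (ID : String) (out : Bool × Bool) : Decidable (Spec_contains_2_3 ID out) := by unfold Spec_contains_2_3; infer_instance

-- ===== CLAIM (what is proved, stated in full; the proofs are below) =====
def Claim_equal_contains_2_3 : Prop := ∀ (ID : String), Dom_contains_2_3 ID → Spec_contains_2_3 ID (contains_2_3 ID)

-- ===== LEMMAS AND PROOFS =====

-- A's loop body is exactly the insert-getD-add-one counter step.
lemma foldA_eq_counter (xs : List Char) :
    xs.foldl
      (fun d letter =>
        if d.contains letter then d.insert letter (d.getD letter 0 + 1)
        else d.insert letter 1)
      PySem.Dict.empty = PySem.Dict.counter xs := by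
  rw [← PySem.Dict.foldl_insert_getD_add_one_eq_counter]
  congr 1
  funext d c
  by_cases h : d.contains c
  · simp [h]
  · have h0 : d.getD c 0 = 0 := PySem.Dict.getD_of_not_contains d 0 (by simpa using h)
    simp [h, h0]

-- B's per-letter sum is the list count.
lemma cnt_eq_count (xs : List Char) (c : Char) :
    ((xs.filter (fun ch => ch == c)).map (fun _ => (1 : Int))).sum = (xs.count c : Int) := by
  induction xs with
  | nil => simp
  | cons x t ih =>
    have hf : (List.filter (fun ch => ch == c) t).length = t.count c := by
      simp [List.count, List.countP_eq_length_filter]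
    by_cases h : x = c
    · simp [h, hf]
      ring
    · simp [h, hf]

lemma mem_values_counter_iff (xs : List Char) (v : Int) :
    v ∈ (PySem.Dict.counter xs).values ↔ ∃ c ∈ PySem.Set.ofList xs, (xs.count c : Int) = v := by
  show v ∈ (PySem.Dict.counter xs).items.map (·.2) ↔ _
  rw [PySem.Dict.items_counter]
  simp [List.mem_map]

-- ===== VERDICT (by name: the statement is the Claim_ definition above) =====
theorem contains_2_3_spec : Claim_equal_contains_2_3 := by
  intro ID _
  unfold Spec_contains_2_3 contains_2_3 contains_2_3_alt
  rw [foldA_eq_counter]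
  refine Prod.ext ?_ ?_ <;>
  · simp only [cnt_eq_count, mem_values_counter_iff]
    rw [Bool.eq_iff_iff]
    simp only [decide_eq_true_eq, List.any_eq_true, beq_iff_eq, PySem.Set.mem_ofList]
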